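-- pv_equiv track=rewrite | github.com/Jordan231111/CodeForce-Solutions | test_Grid_Journey_Sum_Min_Flips.py | expected_sum
-- ===== SOURCE A (Python) =====
-- def expected_sum(n, a, b):
--     sa = [0]*(n+1)
--     sb = [0]*(n+1)
--     for i in range(1, n+1):
--         sa[i] = sa[i-1] + (1 if a[i-1]=='1' else 0)
--         sb[i] = sb[i-1] + (1 if b[i-1]=='1' else 0)
--     ans = 0
--     for x in range(1, n+1):
--         for y in range(1, n+1):
--             s = sa[x] + sb[y]
--             ans += min(s, x + y - s)
--     return str(ans)
-- ===== SOURCE B (Python) =====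
-- def expected_sum(n, a, b):
--     # O(n): rewrite min(s, x+y-s) via 2*min(p,q) = p+q-|p-q|; bucket-count the
--     # walk values of b, take prefix sums over the value range, then one pass over a.
--     if n <= 0:
--         return "0"
--     us = []
--     u = 0
--     for ch in a[:n]:
--         u += -1 if ch == '1' else 1
--         us.append(u)
--     vs = []
--     v = 0
--     for ch in b[:n]:
--         v += -1 if ch == '1' else 1
--         vs.append(v)
--     cnt = {}
--     for v in vs:
--         cnt[v] = cnt.get(v, 0) + 1
--     less_c = {}
--     less_s = {}
--     c = 0
--     s = 0
--     for w in range(-n, n + 1):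
--         less_c[w] = c
--         less_s[w] = s
--         c += cnt.get(w, 0)
--         s += w * cnt.get(w, 0)
--     total_c = c
--     total_s = s
--     tot = 0
--     for u in us:
--         tot += u * (total_c - 2 * less_c[-u]) + (total_s - 2 * less_s[-u])
--     return str((n * n * (n + 1) - tot) // 2)
-- ===== Notes on version B (the rewrite author's own statement) =====
-- stated objective: faster
-- what changed: Replaces the O(n^2) double loop over all (x,y) with the identity 2*min(p,q)=p+q-|p-q|: the pairwise sum of |u_x+v_y| (u,v the +/-1 walk values of a and b) is computed in O(n) by bucket-counting v, prefix-summing count and sum over the value range [-n,n], and one lookup per x.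
import Mathlib
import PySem

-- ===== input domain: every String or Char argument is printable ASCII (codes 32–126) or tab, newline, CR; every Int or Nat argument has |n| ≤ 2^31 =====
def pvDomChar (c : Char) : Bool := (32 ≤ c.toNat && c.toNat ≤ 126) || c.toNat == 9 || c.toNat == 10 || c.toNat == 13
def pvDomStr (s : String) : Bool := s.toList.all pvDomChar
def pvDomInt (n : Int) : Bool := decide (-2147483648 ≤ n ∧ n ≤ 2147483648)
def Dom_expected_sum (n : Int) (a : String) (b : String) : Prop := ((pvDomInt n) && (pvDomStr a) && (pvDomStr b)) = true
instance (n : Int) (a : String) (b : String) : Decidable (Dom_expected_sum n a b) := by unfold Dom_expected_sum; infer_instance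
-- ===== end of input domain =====

-- B replaces A's O(n^2) double loop by an O(n) bucket-count/prefix-sum scheme via 2*min(p,q)=p+q-|p-q|; equivalence proved on Pre_ (n within both string lengths).


-- ===== PORT A =====
-- loop body 'sa[i] = sa[i-1] + (1 if s[i-1]=='1' else 0)' (applied to a and to b)
def pvStepA (s : String) (sa : List Int) (i : Int) : List Int :=
  PySem.List.pySetD sa i
    (PySem.List.pyGetD sa (i - 1) 0 +
      (if PySem.Str.pyGet? s (i - 1) = some '1' then 1 else 0))

def expected_sum (n : Int) (a : String) (b : String) : String :=
  let sa0 : List Int := PySem.List.pyRepeat [0] (n + 1)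
  let sb0 : List Int := PySem.List.pyRepeat [0] (n + 1)
  let p := (PySem.List.pyRange 1 (n + 1)).foldl
      (fun (p : List Int × List Int) i => (pvStepA a p.1 i, pvStepA b p.2 i)) (sa0, sb0)
  let sa := p.1
  let sb := p.2
  let ans := (PySem.List.pyRange 1 (n + 1)).foldl
      (fun ans x =>
        (PySem.List.pyRange 1 (n + 1)).foldl
          (fun ans y =>
            let s := PySem.List.pyGetD sa x 0 + PySem.List.pyGetD sb y 0
            ans + min s (x + y - s))
          ans)
      0
  PySem.Int.toStr ans

-- ===== PORT B =====
-- loop body 'u += -1 if ch == '1' else 1; us.append(u)'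
def pvWalkStep (p : List Int × Int) (ch : Char) : List Int × Int :=
  let u := p.2 + (if ch = '1' then -1 else 1)
  (p.1 ++ [u], u)

-- loop body of 'for w in range(-n, n+1)': record prefix (count, sum), then add bucket w
def pvPrefixStep (cnt : PySem.Dict Int Int)
    (st : PySem.Dict Int Int × PySem.Dict Int Int × Int × Int) (w : Int) :
    PySem.Dict Int Int × PySem.Dict Int Int × Int × Int :=
  (st.1.insert w st.2.2.1, st.2.1.insert w st.2.2.2,
   st.2.2.1 + cnt.getD w 0, st.2.2.2 + w * cnt.getD w 0)

def expected_sum_alt (n : Int) (a : String) (b : String) : String :=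
  if n ≤ 0 then "0" else
  let us := ((PySem.Str.slice a none (some n)).toList.foldl pvWalkStep ([], 0)).1
  let vs := ((PySem.Str.slice b none (some n)).toList.foldl pvWalkStep ([], 0)).1
  let cnt := vs.foldl (fun (d : PySem.Dict Int Int) v => d.insert v (d.getD v 0 + 1))
      PySem.Dict.empty
  let st := (PySem.List.pyRange (-n) (n + 1)).foldl (pvPrefixStep cnt)
      (PySem.Dict.empty, PySem.Dict.empty, 0, 0)
  let lessC := st.1
  let lessS := st.2.1
  let totalC := st.2.2.1
  let totalS := st.2.2.2
  let tot := us.foldl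
      (fun tot u =>
        tot + u * (totalC - 2 * lessC.getD (-u) 0) + (totalS - 2 * lessS.getD (-u) 0)) 0
  PySem.Int.toStr (PySem.Int.floordiv (n * n * (n + 1) - tot) 2)

-- ===== PRECONDITION & SPEC =====
-- Pre_: exactly where A returns — A raises IndexError when n exceeds either string's length.
def Pre_expected_sum (n : Int) (a : String) (b : String) : Prop :=
  n ≤ PySem.Str.len a ∧ n ≤ PySem.Str.len b
instance (n : Int) (a : String) (b : String) : Decidable (Pre_expected_sum n a b) := by
  unfold Pre_expected_sum; infer_instance

def pvWitness_expected_sum : Int × String × String := (2, "10", "01")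

def Spec_expected_sum (n : Int) (a : String) (b : String) (out : String) : Prop := out = expected_sum_alt n a b
instance (n : Int) (a : String) (b : String) (out : String) : Decidable (Spec_expected_sum n a b out) := by unfold Spec_expected_sum; infer_instance

-- ===== CLAIM (what is proved, stated in full; the proofs are below) =====
def Claim_equal_expected_sum : Prop := ∀ (n : Int) (a : String) (b : String), Dom_expected_sum n a b → Pre_expected_sum n a b → Spec_expected_sum n a b (expected_sum n a b)

-- ===== LEMMAS AND PROOFS =====

-- number of '1' among the first j characters
def pvCnt1 (l : List Char) (j : Nat) : Int := ((l.take j).countP (fun c => c == '1') : Int)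

-- walk value after j characters: j - 2 * (#ones among the first j)
def pvWalk (l : List Char) (j : Nat) : Int := (j : Int) - 2 * pvCnt1 l j

-- |u + v| written as B computes it (no abs)
def pvAbsLt (u v : Int) : Int := if v < -u then -(u + v) else u + v

def pvCfun (vs : List Int) (t : Int) : Int := ((vs.filter (fun v => decide (v < t))).length : Int)
def pvSfun (vs : List Int) (t : Int) : Int := (vs.filter (fun v => decide (v < t))).sum

-- the (k,m)-th summand of A, indexed from 0
def pvF (la lb : List Char) (k m : Nat) : Int :=
  min (pvCnt1 la (k + 1) + pvCnt1 lb (m + 1))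
    ((1 + (k : Int)) + (1 + (m : Int)) - (pvCnt1 la (k + 1) + pvCnt1 lb (m + 1)))

def pvAns (la lb : List Char) (N : Nat) : Int :=
  ((List.range N).map (fun k => ((List.range N).map (fun m => pvF la lb k m)).sum)).sum

def pvTot (la lb : List Char) (N : Nat) : Int :=
  ((List.range N).map
    (fun k => ((List.range N).map
      (fun m => pvAbsLt (pvWalk la (k + 1)) (pvWalk lb (m + 1)))).sum)).sum

lemma pvCnt1_nonneg (l : List Char) (j : Nat) : 0 ≤ pvCnt1 l j := by
  simp [pvCnt1]

lemma pvCnt1_le (l : List Char) (j : Nat) : pvCnt1 l j ≤ (j : Int) := by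
  have h := List.countP_le_length (l := l.take j) (p := fun c => c == '1')
  have h2 := List.length_take_le j l
  simp only [pvCnt1]
  exact_mod_cast le_trans h (by simpa using h2)

lemma pvCnt1_succ (l : List Char) (k : Nat) (h : k < l.length) :
    pvCnt1 l (k + 1) = pvCnt1 l k + (if l[k] = '1' then 1 else 0) := by
  simp only [pvCnt1, List.take_add_one, List.getElem?_eq_getElem h, Option.toList_some,
    List.countP_append]
  by_cases hc : l[k] = '1' <;> simp [hc]

lemma pvCnt1_take (l : List Char) (N j : Nat) (h : j ≤ N) :
    pvCnt1 (l.take N) j = pvCnt1 l j := by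
  simp [pvCnt1, List.take_take, Nat.min_eq_left h]

lemma pvWalk_take (l : List Char) (N j : Nat) (h : j ≤ N) :
    pvWalk (l.take N) j = pvWalk l j := by
  simp [pvWalk, pvCnt1_take l N j h]

lemma pvWalk_bounds (l : List Char) (j : Nat) : -(j : Int) ≤ pvWalk l j ∧ pvWalk l j ≤ (j : Int) := by
  have h1 := pvCnt1_nonneg l j
  have h2 := pvCnt1_le l j
  simp only [pvWalk]
  omega

-- A's prefix-array build loop
lemma pvSa_spec (s : String) (n : Int) (hn : 0 < n) (hlen : n ≤ (s.toList.length : Int)) :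
    ∀ k : Nat, k ≤ n.toNat →
      ((PySem.List.pyRange 1 ((k : Int) + 1)).foldl (pvStepA s)
          (PySem.List.pyRepeat [0] (n + 1))).length = n.toNat + 1 ∧
      ∀ j : Nat, j ≤ n.toNat →
        PySem.List.pyGetD
          ((PySem.List.pyRange 1 ((k : Int) + 1)).foldl (pvStepA s)
            (PySem.List.pyRepeat [0] (n + 1))) (j : Int) 0 =
          if j ≤ k then pvCnt1 s.toList j else 0 := by
  intro k
  induction k with
  | zero =>
    intro _
    rw [show ((0 : Nat) : Int) + 1 = 1 by omega, PySem.List.pyRange_one_eq_nil le_rfl,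
      List.foldl_nil, PySem.List.pyRepeat_singleton]
    have hl : (n + 1).toNat = n.toNat + 1 := by omega
    rw [hl]
    refine ⟨List.length_replicate, ?_⟩
    intro j hj
    rw [PySem.List.pyGetD_natCast]
    have hjlt : j < n.toNat + 1 := by omega
    rw [List.getD_eq_getElem _ _ (by simpa using hjlt), List.getElem_replicate]
    by_cases h0 : j ≤ 0
    · have : j = 0 := by omega
      subst this
      simp [pvCnt1]
    · rw [if_neg h0]
  | succ k ih =>
    intro hk1
    obtain ⟨ihlen, ihval⟩ := ih (by omega)
    have hsplit : PySem.List.pyRange 1 (((k + 1 : Nat) : Int) + 1) =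
        PySem.List.pyRange 1 ((k : Int) + 1) ++ [(k : Int) + 1] := by
      rw [show (((k + 1 : Nat) : Int) + 1) = ((k : Int) + 1) + 1 by push_cast; ring]
      exact PySem.List.pyRange_one_succ_right (by omega)
    rw [hsplit, List.foldl_append, List.foldl_cons, List.foldl_nil]
    set res := (PySem.List.pyRange 1 ((k : Int) + 1)).foldl (pvStepA s)
        (PySem.List.pyRepeat [0] (n + 1)) with hres
    have hklt : k < s.toList.length := by omega
    have hval : PySem.List.pyGetD res (((k + 1 : Nat) : Int) - 1) 0 +
        (if PySem.Str.pyGet? s (((k + 1 : Nat) : Int) - 1) = some '1' then 1 else 0) =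
        pvCnt1 s.toList (k + 1) := by
      rw [show (((k + 1 : Nat) : Int) - 1) = (k : Int) by push_cast; ring]
      rw [ihval k (by omega), if_pos le_rfl]
      rw [PySem.Str.pyGet?_eq, PySem.Chars.pyGet?_eq_listPyGet?, PySem.List.pyGet?_natCast,
        List.getElem?_eq_getElem hklt]
      rw [pvCnt1_succ s.toList k hklt]
      by_cases hc : s.toList[k] = '1' <;> simp [hc]
    constructor
    · show (PySem.List.pySetD res ((k : Int) + 1) _).length = _
      rw [show ((k : Int) + 1) = ((k + 1 : Nat) : Int) by push_cast; ring,
        PySem.List.pySetD_natCast]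
      rw [List.length_set, ihlen]
    · intro j hj
      show PySem.List.pyGetD (PySem.List.pySetD res ((k : Int) + 1) _) (j : Int) 0 = _
      rw [show ((k : Int) + 1) = ((k + 1 : Nat) : Int) by push_cast; ring]
      rw [PySem.List.pyGetD_pySetD_natCast res (k + 1) j _ 0 (by rw [ihlen]; omega)]
      by_cases hjk : j = k + 1
      · subst hjk
        rw [if_pos rfl, if_pos le_rfl, hval]
      · rw [if_neg hjk, ihval j hj]
        by_cases hle : j ≤ k
        · rw [if_pos hle, if_pos (by omega)]
        · rw [if_neg hle, if_neg (by omega)]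

-- B's walk loop
lemma pvWalk_fold (cs : List Char) : ∀ (acc : List Int) (u0 : Int),
    cs.foldl pvWalkStep (acc, u0) =
      (acc ++ (List.range cs.length).map (fun k => u0 + pvWalk cs (k + 1)),
       u0 + pvWalk cs cs.length) := by
  induction cs with
  | nil => intro acc u0; simp [pvWalk, pvCnt1]
  | cons c t ih =>
    intro acc u0
    have hstep : pvWalk (c :: t) 1 = (if c = '1' then -1 else 1) := by
      by_cases hc : c = '1' <;> simp [pvWalk, pvCnt1, hc]
    have hrest : ∀ j : Nat, pvWalk (c :: t) (j + 1) = (if c = '1' then -1 else 1) + pvWalk t j := by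
      intro j
      by_cases hc : c = '1' <;>
        simp [pvWalk, pvCnt1, List.take_succ_cons, hc] <;> push_cast <;> ring
    simp only [List.foldl_cons, pvWalkStep]
    rw [ih]
    refine Prod.ext ?_ ?_
    · show acc ++ [u0 + if c = '1' then -1 else 1] ++
        (List.range t.length).map (fun k => (u0 + if c = '1' then -1 else 1) + pvWalk t (k + 1)) =
        acc ++ (List.range (c :: t).length).map (fun k => u0 + pvWalk (c :: t) (k + 1))
      rw [List.length_cons, List.range_succ_eq_map, List.map_cons, List.map_map,
        List.append_assoc]
      congr 1
      rw [List.singleton_append]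
      congr 1
      · rw [hstep]
      · refine List.map_congr_left ?_
        intro k _
        simp only [Function.comp]
        rw [hrest (k + 1)]
        ring
    · show (u0 + if c = '1' then -1 else 1) + pvWalk t t.length =
        u0 + pvWalk (c :: t) (c :: t).length
      rw [List.length_cons, hrest t.length]
      ring

lemma pvSum_ite_mem (W : List Int) (hW : W.Nodup) (x : Int) :
    (W.map (fun w => if x = w then (1 : Int) else 0)).sum = if x ∈ W then 1 else 0 := by
  induction W with
  | nil => simp
  | cons w r ih =>
    rcases List.nodup_cons.mp hW with ⟨hnm, hr⟩
    by_cases hx : x = w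
    · subst hx
      simp [List.mem_cons, hnm, ih hr]
    · simp [List.mem_cons, hx, ih hr]

lemma pvSum_ite_mem_w (W : List Int) (hW : W.Nodup) (x : Int) :
    (W.map (fun w => if x = w then w else (0 : Int))).sum = if x ∈ W then x else 0 := by
  induction W with
  | nil => simp
  | cons w r ih =>
    rcases List.nodup_cons.mp hW with ⟨hnm, hr⟩
    by_cases hx : x = w
    · subst hx
      simp only [List.map_cons, List.sum_cons, List.mem_cons, true_or, if_pos]
      have hz : (List.map (fun w => if x = w then w else (0 : Int)) r).sum = 0 := by
        refine List.sum_eq_zero ?_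
        intro z hz
        rcases List.mem_map.mp hz with ⟨w', hw', rfl⟩
        rw [if_neg]
        rintro rfl
        exact hnm hw'
      rw [hz]
      ring
    · simp [List.mem_cons, hx, ih hr]

lemma pvRange_count (vs : List Int) (n t : Int)
    (hbd : ∀ v ∈ vs, -n ≤ v ∧ v ≤ n) :
    ((PySem.List.pyRange (-n) t).map (fun w => (vs.count w : Int))).sum = pvCfun vs t ∧
    ((PySem.List.pyRange (-n) t).map (fun w => w * (vs.count w : Int))).sum = pvSfun vs t := by
  induction vs with
  | nil => simp [pvCfun, pvSfun]
  | cons x r ih =>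
    have hbr : ∀ v ∈ r, -n ≤ v ∧ v ≤ n := fun v hv => hbd v (List.mem_cons_of_mem _ hv)
    obtain ⟨ih1, ih2⟩ := ih hbr
    have hxb := hbd x (List.mem_cons_self)
    have hmem : (x ∈ PySem.List.pyRange (-n) t) ↔ x < t := by
      rw [PySem.List.mem_pyRange_one]
      exact ⟨fun h => h.2, fun h => ⟨hxb.1, h⟩⟩
    have hnd := PySem.List.nodup_pyRange_one (a := -n) (b := t)
    have hc : ∀ w : Int, (((x :: r).count w : Int)) = (r.count w : Int) + (if x = w then 1 else 0) := by
      intro w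
      by_cases h : x = w <;> simp [h]
    constructor
    · calc ((PySem.List.pyRange (-n) t).map (fun w => ((x :: r).count w : Int))).sum
          = ((PySem.List.pyRange (-n) t).map
              (fun w => (r.count w : Int) + (if x = w then 1 else 0))).sum := by
            exact congrArg List.sum (List.map_congr_left (fun w _ => hc w))
        _ = ((PySem.List.pyRange (-n) t).map (fun w => (r.count w : Int))).sum
            + ((PySem.List.pyRange (-n) t).map (fun w => if x = w then (1 : Int) else 0)).sum :=
            PySem.List.sum_map_add_int _ _ _
        _ = pvCfun (x :: r) t := by
            rw [ih1, pvSum_ite_mem _ hnd, pvCfun, pvCfun, List.filter_cons]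
            by_cases hx : x < t <;> simp [hx, hmem] <;> push_cast <;> ring
    · calc ((PySem.List.pyRange (-n) t).map (fun w => w * ((x :: r).count w : Int))).sum
          = ((PySem.List.pyRange (-n) t).map
              (fun w => w * (r.count w : Int) + (if x = w then w else 0))).sum := by
            refine congrArg List.sum (List.map_congr_left (fun w _ => ?_))
            rw [hc w]
            by_cases h : x = w <;> simp [h] <;> ring
        _ = ((PySem.List.pyRange (-n) t).map (fun w => w * (r.count w : Int))).sum
            + ((PySem.List.pyRange (-n) t).map (fun w => if x = w then w else (0 : Int))).sum :=
            PySem.List.sum_map_add_int _ _ _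
        _ = pvSfun (x :: r) t := by
            rw [ih2, pvSum_ite_mem_w _ hnd, pvSfun, pvSfun, List.filter_cons]
            by_cases hx : x < t <;> simp [hx, hmem] <;> push_cast <;> ring

-- B's prefix loop over the value range
lemma pvPrefix_spec (cnt : PySem.Dict Int Int) (n : Int) :
    ∀ m : Nat,
      (∀ w : Int, -n ≤ w → w < -n + (m : Int) →
        ((PySem.List.pyRange (-n) (-n + (m : Int))).foldl (pvPrefixStep cnt)
            (PySem.Dict.empty, PySem.Dict.empty, 0, 0)).1.getD w 0 =
          ((PySem.List.pyRange (-n) w).map (fun w' => cnt.getD w' 0)).sum ∧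
        ((PySem.List.pyRange (-n) (-n + (m : Int))).foldl (pvPrefixStep cnt)
            (PySem.Dict.empty, PySem.Dict.empty, 0, 0)).2.1.getD w 0 =
          ((PySem.List.pyRange (-n) w).map (fun w' => w' * cnt.getD w' 0)).sum) ∧
      ((PySem.List.pyRange (-n) (-n + (m : Int))).foldl (pvPrefixStep cnt)
          (PySem.Dict.empty, PySem.Dict.empty, 0, 0)).2.2.1 =
        ((PySem.List.pyRange (-n) (-n + (m : Int))).map (fun w' => cnt.getD w' 0)).sum ∧
      ((PySem.List.pyRange (-n) (-n + (m : Int))).foldl (pvPrefixStep cnt)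
          (PySem.Dict.empty, PySem.Dict.empty, 0, 0)).2.2.2 =
        ((PySem.List.pyRange (-n) (-n + (m : Int))).map (fun w' => w' * cnt.getD w' 0)).sum := by
  intro m
  induction m with
  | zero =>
    rw [show (-n + ((0 : Nat) : Int)) = -n by omega, PySem.List.pyRange_one_eq_nil le_rfl]
    refine ⟨?_, by simp, by simp⟩
    intro w h1 h2
    omega
  | succ m ih =>
    obtain ⟨ihw, ihc, ihs⟩ := ih
    have hcast : (-n + ((m + 1 : Nat) : Int)) = (-n + (m : Int)) + 1 := by push_cast; ring
    have hsplit : PySem.List.pyRange (-n) (-n + ((m + 1 : Nat) : Int)) =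
        PySem.List.pyRange (-n) (-n + (m : Int)) ++ [-n + (m : Int)] := by
      rw [hcast]
      exact PySem.List.pyRange_one_succ_right (by omega)
    rw [hsplit, List.foldl_append, List.foldl_cons, List.foldl_nil]
    set st := (PySem.List.pyRange (-n) (-n + (m : Int))).foldl (pvPrefixStep cnt)
        (PySem.Dict.empty, PySem.Dict.empty, 0, 0) with hst
    refine ⟨?_, ?_, ?_⟩
    · intro w h1 h2
      by_cases hw : w = -n + (m : Int)
      · subst hw
        constructor
        · show (st.1.insert _ st.2.2.1).getD _ 0 = _
          rw [PySem.Dict.getD_insert, if_pos rfl, ihc]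
        · show (st.2.1.insert _ st.2.2.2).getD _ 0 = _
          rw [PySem.Dict.getD_insert, if_pos rfl, ihs]
      · have hlt : w < -n + (m : Int) := by omega
        obtain ⟨e1, e2⟩ := ihw w h1 hlt
        constructor
        · show (st.1.insert _ st.2.2.1).getD _ 0 = _
          rw [PySem.Dict.getD_insert, if_neg hw, e1]
        · show (st.2.1.insert _ st.2.2.2).getD _ 0 = _
          rw [PySem.Dict.getD_insert, if_neg hw, e2]
    · show st.2.2.1 + cnt.getD (-n + (m : Int)) 0 = _
      rw [hsplit] at *
      rw [List.map_append, List.sum_append, ihc]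
      simp
    · show st.2.2.2 + (-n + (m : Int)) * cnt.getD (-n + (m : Int)) 0 = _
      rw [hsplit] at *
      rw [List.map_append, List.sum_append, ihs]
      simp

lemma pvPair_sum (vs : List Int) (u : Int) :
    u * ((vs.length : Int) - 2 * pvCfun vs (-u)) + (vs.sum - 2 * pvSfun vs (-u)) =
      (vs.map (fun v => pvAbsLt u v)).sum := by
  induction vs with
  | nil => simp [pvCfun, pvSfun]
  | cons v r ih =>
    simp only [pvCfun, pvSfun, List.filter_cons, List.map_cons, List.sum_cons,
      List.length_cons, pvAbsLt] at *
    by_cases hv : v < -u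
    · simp only [hv, decide_true, if_true, List.length_cons, List.sum_cons] at *
      push_cast at *
      linarith [ih]
    · simp only [hv, decide_false, if_false] at *
      push_cast at *
      linarith [ih]

lemma pvGauss (N : Nat) :
    2 * ((List.range N).map (fun k : Nat => (1 : Int) + (k : Int))).sum = N * (N + 1) := by
  induction N with
  | zero => simp
  | succ m ih =>
    rw [List.range_succ, List.map_append, List.sum_append]
    simp only [List.map_cons, List.map_nil, List.sum_cons, List.sum_nil]
    push_cast
    nlinarith [ih]

-- per-pair identity: 2*min + |u+v| = x + y
lemma pvPointwise (X Y p q : Int) :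
    2 * min (p + q) (X + Y - (p + q)) + pvAbsLt (X - 2 * p) (Y - 2 * q) = X + Y := by
  simp only [pvAbsLt]
  split_ifs <;> omega

-- evaluation of port A on the positive case
lemma pvA_eval (n : Int) (a b : String) (hn : 0 < n)
    (hla : n ≤ (a.toList.length : Int)) (hlb : n ≤ (b.toList.length : Int)) :
    expected_sum n a b = PySem.Int.toStr (pvAns a.toList b.toList n.toNat) := by
  have e1 : n + 1 = ((n.toNat : Int)) + 1 := by omega
  simp only [expected_sum]
  rw [PySem.List.foldl_prod_mk (f := pvStepA a) (g := pvStepA b)]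
  obtain ⟨hlenA, hvalA⟩ := pvSa_spec a n hn hla n.toNat le_rfl
  obtain ⟨hlenB, hvalB⟩ := pvSa_spec b n hn hlb n.toNat le_rfl
  rw [e1] at hlenA hvalA hlenB hvalB ⊢
  set M := n.toNat with hM
  set R := PySem.List.pyRange 1 ((M : Int) + 1) with hR
  set sa := List.foldl (pvStepA a) (PySem.List.pyRepeat [0] ((M : Int) + 1)) R with hsa0
  set sb := List.foldl (pvStepA b) (PySem.List.pyRepeat [0] ((M : Int) + 1)) R with hsb0
  dsimp only
  have hmem : ∀ x ∈ R, 1 ≤ x ∧ x < (M : Int) + 1 := by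
    intro x hx
    exact PySem.List.mem_pyRange_one.mp hx
  have hgA : ∀ x ∈ R, PySem.List.pyGetD sa x 0 = pvCnt1 a.toList x.toNat := by
    intro x hx
    obtain ⟨h1, h2⟩ := hmem x hx
    have h := hvalA x.toNat (by omega)
    rw [if_pos (le_refl x.toNat |>.trans (by omega)), show ((x.toNat : Nat) : Int) = x by omega] at h
    exact h
  have hgB : ∀ x ∈ R, PySem.List.pyGetD sb x 0 = pvCnt1 b.toList x.toNat := by
    intro x hx
    obtain ⟨h1, h2⟩ := hmem x hx
    have h := hvalB x.toNat (by omega)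
    rw [if_pos (le_refl x.toNat |>.trans (by omega)), show ((x.toNat : Nat) : Int) = x by omega] at h
    exact h
  have hstep1 : List.foldl
      (fun ans x => List.foldl
        (fun ans y => ans + min (PySem.List.pyGetD sa x 0 + PySem.List.pyGetD sb y 0)
          (x + y - (PySem.List.pyGetD sa x 0 + PySem.List.pyGetD sb y 0))) ans R) 0 R =
      (R.map (fun x => (R.map (fun y =>
        min (pvCnt1 a.toList x.toNat + pvCnt1 b.toList y.toNat)
          (x + y - (pvCnt1 a.toList x.toNat + pvCnt1 b.toList y.toNat)))).sum)).sum := by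
    rw [PySem.List.foldl_congr_mem (g := fun ans x => ans + (R.map (fun y =>
        min (pvCnt1 a.toList x.toNat + pvCnt1 b.toList y.toNat)
          (x + y - (pvCnt1 a.toList x.toNat + pvCnt1 b.toList y.toNat)))).sum)]
    · rw [PySem.List.foldl_add]
      simp
    · intro acc x hx
      rw [PySem.List.foldl_congr_mem (g := fun ans y => ans +
          min (pvCnt1 a.toList x.toNat + pvCnt1 b.toList y.toNat)
            (x + y - (pvCnt1 a.toList x.toNat + pvCnt1 b.toList y.toNat)))]
      · rw [PySem.List.foldl_add]
      · intro acc2 y hy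
        rw [hgA x hx, hgB y hy]
  rw [hstep1]
  congr 1
  rw [hR, PySem.List.pyRange_one 1 ((M : Int) + 1),
    show ((M : Int) + 1 - 1).toNat = M by omega]
  rw [List.map_map, pvAns]
  refine congrArg List.sum (List.map_congr_left ?_)
  intro k hk
  simp only [Function.comp_apply]
  rw [List.map_map]
  refine congrArg List.sum (List.map_congr_left ?_)
  intro m hm
  simp only [Function.comp]
  rw [show ((1 : Int) + (k : Int)).toNat = k + 1 by omega,
    show ((1 : Int) + (m : Int)).toNat = m + 1 by omega, pvF]

-- evaluation of port B-- evaluation of port B on the positive case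
lemma pvB_eval (n : Int) (a b : String) (hn : 0 < n)
    (hla : n ≤ (a.toList.length : Int)) (hlb : n ≤ (b.toList.length : Int)) :
    expected_sum_alt n a b = PySem.Int.toStr (PySem.Int.floordiv
      (n * n * (n + 1) - pvTot a.toList b.toList n.toNat) 2) := by
  have hnn : ¬ n ≤ 0 := by omega
  simp only [expected_sum_alt, if_neg hnn]
  set M := n.toNat with hM
  have hsl : ∀ s : String, (PySem.Str.slice s none (some n)).toList = s.toList.take M := by
    intro s
    simp [PySem.Str.slice]
    rw [PySem.List.slice_to _ (by omega : (0:Int) ≤ n)]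
  rw [hsl a, hsl b, pvWalk_fold (a.toList.take M) [] 0, pvWalk_fold (b.toList.take M) [] 0]
  dsimp only
  have hlenA : (a.toList.take M).length = M := by rw [List.length_take]; omega
  have hlenB : (b.toList.take M).length = M := by rw [List.length_take]; omega
  rw [hlenA, hlenB, List.nil_append, List.nil_append]
  have hus : (List.range M).map (fun k => (0 : Int) + pvWalk (a.toList.take M) (k + 1)) =
      (List.range M).map (fun k => pvWalk a.toList (k + 1)) := by
    refine List.map_congr_left ?_
    intro k hk
    rw [zero_add, pvWalk_take a.toList M (k + 1) (by simpa using List.mem_range.mp hk)]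
  have hvs : (List.range M).map (fun k => (0 : Int) + pvWalk (b.toList.take M) (k + 1)) =
      (List.range M).map (fun k => pvWalk b.toList (k + 1)) := by
    refine List.map_congr_left ?_
    intro k hk
    rw [zero_add, pvWalk_take b.toList M (k + 1) (by simpa using List.mem_range.mp hk)]
  rw [hus, hvs]
  set us := (List.range M).map (fun k => pvWalk a.toList (k + 1)) with husd
  set vs := (List.range M).map (fun k => pvWalk b.toList (k + 1)) with hvsd
  set cnt := vs.foldl (fun (d : PySem.Dict Int Int) v => d.insert v (d.getD v 0 + 1))
      PySem.Dict.empty with hcntd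
  have hcnt : ∀ w : Int, cnt.getD w 0 = (vs.count w : Int) := by
    intro w
    rw [hcntd, PySem.Dict.getD_foldl_insert_add_one]
    simp
  have hvb : ∀ v ∈ vs, -n ≤ v ∧ v ≤ n := by
    intro v hv
    rw [hvsd] at hv
    rcases List.mem_map.mp hv with ⟨m, hm, rfl⟩
    have hm' := List.mem_range.mp hm
    have := pvWalk_bounds b.toList (m + 1)
    have hc : ((m + 1 : Nat) : Int) ≤ (M : Int) := by omega
    constructor <;> omega
  have hub : ∀ u ∈ us, -n ≤ u ∧ u ≤ n := by
    intro u hu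
    rw [husd] at hu
    rcases List.mem_map.mp hu with ⟨m, hm, rfl⟩
    have hm' := List.mem_range.mp hm
    have := pvWalk_bounds a.toList (m + 1)
    have hc : ((m + 1 : Nat) : Int) ≤ (M : Int) := by omega
    constructor <;> omega
  have hconvC : ∀ L : List Int, (L.map (fun w' => cnt.getD w' 0)).sum =
      (L.map (fun w => (vs.count w : Int))).sum := by
    intro L
    exact congrArg List.sum (List.map_congr_left (fun w _ => hcnt w))
  have hconvS : ∀ L : List Int, (L.map (fun w' => w' * cnt.getD w' 0)).sum =
      (L.map (fun w => w * (vs.count w : Int))).sum := by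
    intro L
    exact congrArg List.sum (List.map_congr_left (fun w _ => by rw [hcnt w]))
  have e2 : PySem.List.pyRange (-n) (n + 1) =
      PySem.List.pyRange (-n) (-n + ((2 * M + 1 : Nat) : Int)) := by
    congr 1
    push_cast
    omega
  rw [e2]
  obtain ⟨hw, hc, hs⟩ := pvPrefix_spec cnt n (2 * M + 1)
  set st := (PySem.List.pyRange (-n) (-n + ((2 * M + 1 : Nat) : Int))).foldl (pvPrefixStep cnt)
      (PySem.Dict.empty, PySem.Dict.empty, 0, 0) with hstd
  have hend : -n + ((2 * M + 1 : Nat) : Int) = n + 1 := by push_cast; omega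
  have hfull : vs.filter (fun v => decide (v < n + 1)) = vs := by
    refine List.filter_eq_self.mpr ?_
    intro v hv
    have := hvb v hv
    simp only [decide_eq_true_eq]
    omega
  have htc : st.2.2.1 = (vs.length : Int) := by
    rw [hc, hconvC, (pvRange_count vs n (-n + ((2 * M + 1 : Nat) : Int)) hvb).1, hend, pvCfun,
      hfull]
  have hts : st.2.2.2 = vs.sum := by
    rw [hs, hconvS, (pvRange_count vs n (-n + ((2 * M + 1 : Nat) : Int)) hvb).2, hend, pvSfun,
      hfull]
  have hlookC : ∀ u ∈ us, st.1.getD (-u) 0 = pvCfun vs (-u) := by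
    intro u hu
    obtain ⟨h1, h2⟩ := hub u hu
    obtain ⟨e1', _⟩ := hw (-u) (by omega) (by rw [hend]; omega)
    rw [e1', hconvC, (pvRange_count vs n (-u) hvb).1]
  have hlookS : ∀ u ∈ us, st.2.1.getD (-u) 0 = pvSfun vs (-u) := by
    intro u hu
    obtain ⟨h1, h2⟩ := hub u hu
    obtain ⟨_, e2'⟩ := hw (-u) (by omega) (by rw [hend]; omega)
    rw [e2', hconvS, (pvRange_count vs n (-u) hvb).2]
  have htot : us.foldl (fun tot u => tot + u * (st.2.2.1 - 2 * st.1.getD (-u) 0) +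
      (st.2.2.2 - 2 * st.2.1.getD (-u) 0)) 0 = pvTot a.toList b.toList M := by
    rw [PySem.List.foldl_congr_mem
      (g := fun tot u => tot + (vs.map (fun v => pvAbsLt u v)).sum)]
    · rw [PySem.List.foldl_add, zero_add, husd, List.map_map, pvTot]
      refine congrArg List.sum (List.map_congr_left ?_)
      intro k hk
      simp only [Function.comp_apply]
      rw [hvsd, List.map_map]
      exact congrArg List.sum (List.map_congr_left (fun m _ => rfl))
    · intro acc u hu
      rw [hlookC u hu, hlookS u hu, htc, hts, add_assoc, pvPair_sum vs u]
  rw [htot]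

-- the combinatorial identity connecting the two
lemma pvMain (la lb : List Char) (N : Nat) :
    (N : Int) * (N : Int) * ((N : Int) + 1) - pvTot la lb N = 2 * pvAns la lb N := by
  set T : Int := ((List.range N).map (fun k : Nat => (1 : Int) + (k : Int))).sum with hT
  have hG := pvGauss N
  have hpt : ∀ k m : Nat, 2 * pvF la lb k m + pvAbsLt (pvWalk la (k + 1)) (pvWalk lb (m + 1)) =
      ((1 : Int) + (k : Int)) + ((1 : Int) + (m : Int)) := by
    intro k m
    have hwa : pvWalk la (k + 1) = (1 + (k : Int)) - 2 * pvCnt1 la (k + 1) := by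
      simp only [pvWalk]
      push_cast
      ring
    have hwb : pvWalk lb (m + 1) = (1 + (m : Int)) - 2 * pvCnt1 lb (m + 1) := by
      simp only [pvWalk]
      push_cast
      ring
    have h := pvPointwise (1 + (k : Int)) (1 + (m : Int)) (pvCnt1 la (k + 1)) (pvCnt1 lb (m + 1))
    rw [pvF, hwa, hwb]
    exact h
  have hinner : ∀ k : Nat,
      2 * ((List.range N).map (fun m => pvF la lb k m)).sum +
        ((List.range N).map (fun m => pvAbsLt (pvWalk la (k + 1)) (pvWalk lb (m + 1)))).sum =
      (N : Int) * ((1 : Int) + (k : Int)) + T := by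
    intro k
    rw [← List.sum_map_mul_left, ← PySem.List.sum_map_add_int]
    have : ((List.range N).map
        (fun m => 2 * pvF la lb k m + pvAbsLt (pvWalk la (k + 1)) (pvWalk lb (m + 1)))).sum =
        ((List.range N).map
        (fun m : Nat => ((1 : Int) + (k : Int)) + ((1 : Int) + (m : Int)))).sum := by
      exact congrArg List.sum (List.map_congr_left (fun m _ => hpt k m))
    rw [this, PySem.List.sum_map_add_int, PySem.List.sum_map_const_int, ← hT]
    simp
  have htotal : 2 * pvAns la lb N + pvTot la lb N = 2 * ((N : Int) * T) := by
    rw [pvAns, pvTot, ← List.sum_map_mul_left, ← PySem.List.sum_map_add_int]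
    have : ((List.range N).map
        (fun k => 2 * ((List.range N).map (fun m => pvF la lb k m)).sum +
          ((List.range N).map
            (fun m => pvAbsLt (pvWalk la (k + 1)) (pvWalk lb (m + 1)))).sum)).sum =
        ((List.range N).map (fun k : Nat => (N : Int) * ((1 : Int) + (k : Int)) + T)).sum := by
      exact congrArg List.sum (List.map_congr_left (fun k _ => hinner k))
    rw [this, PySem.List.sum_map_add_int, PySem.List.sum_map_const_int, List.length_range,
      List.sum_map_mul_left, ← hT]
    ring
  have hNT : 2 * ((N : Int) * T) = (N : Int) * ((N : Int) * ((N : Int) + 1)) := by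
    calc 2 * ((N : Int) * T) = (N : Int) * (2 * T) := by ring
      _ = (N : Int) * ((N : Int) * ((N : Int) + 1)) := by rw [hG]
  linarith [htotal, hNT]

-- ===== VERDICT (by name: the statement is the Claim_ definition above) =====
theorem expected_sum_spec : Claim_equal_expected_sum := by
  intro n a b _ hPre
  unfold Spec_expected_sum
  obtain ⟨hPa, hPb⟩ := hPre
  rw [PySem.Str.len_eq] at hPa hPb
  by_cases hn0 : n ≤ 0
  · simp only [expected_sum, expected_sum_alt, if_pos hn0,
      PySem.List.pyRange_one_eq_nil (show n + 1 ≤ 1 by omega), List.foldl_nil]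
    decide
  · have hn : 0 < n := by omega
    rw [pvA_eval n a b hn hPa hPb, pvB_eval n a b hn hPa hPb]
    have hN : ((n.toNat : Int)) = n := by omega
    have := pvMain a.toList b.toList n.toNat
    rw [hN] at this
    rw [show (n * n * (n + 1) - pvTot a.toList b.toList n.toNat) =
        2 * pvAns a.toList b.toList n.toNat from this]
    rw [PySem.Int.floordiv_eq_ediv_of_pos (by norm_num)]
    rw [Int.mul_ediv_cancel_left _ (by norm_num)]
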